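-- pv_equiv track=rewrite | github.com/Victor-Dixon/Dream.os | tools/v2_compliance_dashboard_sync.py | categorize_violations
-- ===== SOURCE A (Python) =====
-- from typing import Dict, List, Tuple
--
-- def categorize_violations(violations: List[Dict]) -> Dict[str, List[Dict]]:
--     """Categorize violations by severity."""
--     categories = {
--         'critical': [],  # >1000 lines
--         'major': [],     # 500-1000 lines
--         'moderate': [],  # 400-500 lines
--         'minor': []      # 300-400 lines
--     }
--
--     for v in violations:
--         if v['lines'] > 1000:
--             categories['critical'].append(v)
--         elif v['lines'] > 500:
--             categories['major'].append(v)
--         elif v['lines'] > 400: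
--             categories['moderate'].append(v)
--         else:
--             categories['minor'].append(v)
--
--     return categories
-- ===== SOURCE B (Python) =====
-- from typing import Dict, List
--
-- def categorize_violations(violations: List[Dict]) -> Dict[str, List[Dict]]:
--     """Categorize violations by severity (four independent filter passes)."""
--     return {
--         'critical': [v for v in violations if v['lines'] > 1000],
--         'major':    [v for v in violations if 500 < v['lines'] <= 1000],
--         'moderate': [v for v in violations if 400 < v['lines'] <= 500],
--         'minor':    [v for v in violations if v['lines'] <= 400],
--     }
-- ===== Notes on version B (the rewrite author's own statement) =====
-- stated objective: alternative
-- what changed: The single if/elif branching loop over a mutated dict is replaced by four independent list comprehensions, one per severity bucket, each with an explicit half-open range predicate, assembled directly into the returned dict.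
import Mathlib
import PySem

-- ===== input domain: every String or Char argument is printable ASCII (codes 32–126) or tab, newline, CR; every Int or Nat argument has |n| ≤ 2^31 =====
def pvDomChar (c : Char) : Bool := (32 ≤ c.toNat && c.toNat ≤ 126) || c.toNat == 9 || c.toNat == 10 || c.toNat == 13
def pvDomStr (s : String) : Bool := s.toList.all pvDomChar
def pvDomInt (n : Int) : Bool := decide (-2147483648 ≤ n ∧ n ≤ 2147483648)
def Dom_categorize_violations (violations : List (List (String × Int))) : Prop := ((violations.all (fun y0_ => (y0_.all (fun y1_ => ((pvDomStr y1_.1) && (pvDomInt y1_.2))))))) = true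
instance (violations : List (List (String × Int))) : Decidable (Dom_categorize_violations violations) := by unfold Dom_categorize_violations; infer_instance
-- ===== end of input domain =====

-- B replaces A's single if/elif branching pass with four independent filter passes, one per
-- severity bucket with explicit range predicates (alternative decomposition, same cost).

-- v['lines'] : first-match lookup; Pre_ guarantees the key is present (else Python raises KeyError)
def pvLines (v : List (String × Int)) : Int := (v.lookup "lines").getD 0

-- ===== PORT A =====
-- the loop mutates the four lists of the categories dict; state = (critical, major, moderate, minor)
def categorize_violations (violations : List (List (String × Int))) : List (String × List (List (String × Int))) :=
  let st := violations.foldl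
    (fun (st : List (List (String × Int)) × List (List (String × Int)) × List (List (String × Int)) × List (List (String × Int))) v =>
      let (c, m, mo, mi) := st
      if pvLines v > 1000 then (c ++ [v], m, mo, mi)
      else if pvLines v > 500 then (c, m ++ [v], mo, mi)
      else if pvLines v > 400 then (c, m, mo ++ [v], mi)
      else (c, m, mo, mi ++ [v]))
    ([], [], [], [])
  [("critical", st.1), ("major", st.2.1), ("moderate", st.2.2.1), ("minor", st.2.2.2)]

-- ===== PORT B =====
def categorize_violations_alt (violations : List (List (String × Int))) : List (String × List (List (String × Int))) :=
  [("critical", violations.filter (fun v => pvLines v > 1000)),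
   ("major",    violations.filter (fun v => 500 < pvLines v && pvLines v ≤ 1000)),
   ("moderate", violations.filter (fun v => 400 < pvLines v && pvLines v ≤ 500)),
   ("minor",    violations.filter (fun v => pvLines v ≤ 400))]

-- ===== PRECONDITION & SPEC =====
-- Pre_ excludes violations lacking a "lines" key, on which A (and B) raise KeyError.
def Pre_categorize_violations (violations : List (List (String × Int))) : Prop :=
  ∀ v ∈ violations, (v.lookup "lines").isSome

instance (violations : List (List (String × Int))) : Decidable (Pre_categorize_violations violations) := by
  unfold Pre_categorize_violations; infer_instance

def pvWitness_categorize_violations : (List (List (String × Int))) :=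
  [[("lines", 1200)], [("lines", 700)], [("lines", 450)], [("lines", 100)]]

def Spec_categorize_violations (violations : List (List (String × Int))) (out : List (String × List (List (String × Int)))) : Prop := out = categorize_violations_alt violations
instance (violations : List (List (String × Int))) (out : List (String × List (List (String × Int)))) : Decidable (Spec_categorize_violations violations out) := by unfold Spec_categorize_violations; infer_instance

-- ===== CLAIM (what is proved, stated in full; the proofs are below) =====
def Claim_equal_categorize_violations : Prop := ∀ (violations : List (List (String × Int))), Dom_categorize_violations violations → Pre_categorize_violations violations → Spec_categorize_violations violations (categorize_violations violations)

-- ===== LEMMAS AND PROOFS =====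

-- loop invariant: folding from state (c, m, mo, mi) appends the four filters
theorem categorize_foldl_inv (vs : List (List (String × Int)))
    (c m mo mi : List (List (String × Int))) :
    vs.foldl
      (fun (st : List (List (String × Int)) × List (List (String × Int)) × List (List (String × Int)) × List (List (String × Int))) v =>
        let (c, m, mo, mi) := st
        if pvLines v > 1000 then (c ++ [v], m, mo, mi)
        else if pvLines v > 500 then (c, m ++ [v], mo, mi)
        else if pvLines v > 400 then (c, m, mo ++ [v], mi)
        else (c, m, mo, mi ++ [v]))
      (c, m, mo, mi)
    = (c ++ vs.filter (fun v => pvLines v > 1000),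
       m ++ vs.filter (fun v => 500 < pvLines v && pvLines v ≤ 1000),
       mo ++ vs.filter (fun v => 400 < pvLines v && pvLines v ≤ 500),
       mi ++ vs.filter (fun v => pvLines v ≤ 400)) := by
  induction vs generalizing c m mo mi with
  | nil => simp
  | cons v vs ih =>
    simp only [List.foldl_cons, List.filter_cons]
    by_cases h1 : pvLines v > 1000
    · simp only [h1, if_pos]
      rw [ih]
      have h2 : ¬ (500 < pvLines v && pvLines v ≤ 1000) = true := by simp; omega
      have h3 : ¬ (400 < pvLines v && pvLines v ≤ 500) = true := by simp; omega
      have h4 : ¬ (pvLines v ≤ 400 : Bool) = true := by simp; omega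
      simp [h1, h2, h3, h4]
    · by_cases h2 : pvLines v > 500
      · simp only [h1, if_neg, h2, if_pos]
        rw [ih]
        have hb : (500 < pvLines v && pvLines v ≤ 1000) = true := by simp; omega
        have h3 : ¬ (400 < pvLines v && pvLines v ≤ 500) = true := by simp; omega
        have h4 : ¬ (pvLines v ≤ 400 : Bool) = true := by simp; omega
        simp [h1, hb, h3, h4]
      · by_cases h3 : pvLines v > 400
        · simp only [h1, h2, h3, if_neg, if_pos]
          rw [ih]
          have hb : (400 < pvLines v && pvLines v ≤ 500) = true := by simp; omega
          have h4 : ¬ (pvLines v ≤ 400 : Bool) = true := by simp; omega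
          simp [h1, h2, hb, h4]
        · simp only [h1, h2, h3, if_neg]
          rw [ih]
          have hb : (pvLines v ≤ 400 : Bool) = true := by simp; omega
          have hm : ¬ (500 < pvLines v && pvLines v ≤ 1000) = true := by simp; omega
          have hmo : ¬ (400 < pvLines v && pvLines v ≤ 500) = true := by simp; omega
          simp [h1, hm, hmo, hb]

-- ===== VERDICT (by name: the statement is the Claim_ definition above) =====
theorem categorize_violations_spec : Claim_equal_categorize_violations := by
  intro violations _ _
  unfold Spec_categorize_violations categorize_violations categorize_violations_alt
  rw [categorize_foldl_inv]
  simp
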